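-- pv_equiv track=rewrite | github.com/jackzkidder/SimWorld | simworld/backend/app/services/orchestrator.py | _compute_sentiment_breakdown
-- ===== SOURCE A (Python) =====
-- def _compute_sentiment_breakdown(agents: list) -> dict:
--     """Count agents by sentiment."""
--     breakdown = {"positive": 0, "negative": 0, "neutral": 0, "mixed": 0}
--     for a in agents:
--         s = a.get("sentiment", "neutral")
--         if s in breakdown:
--             breakdown[s] += 1
--         else:
--             breakdown["neutral"] += 1
--     return breakdown
-- ===== SOURCE B (Python) =====
-- def _compute_sentiment_breakdown(agents: list) -> dict:
--     """Count agents by sentiment."""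
--     sentiments = [a.get("sentiment", "neutral") for a in agents]
--     p = sentiments.count("positive")
--     n = sentiments.count("negative")
--     m = sentiments.count("mixed")
--     return {"positive": p, "negative": n,
--             "neutral": len(agents) - p - n - m, "mixed": m}
-- ===== Notes on version B (the rewrite author's own statement) =====
-- stated objective: alternative
-- what changed: Drops A's mutable bucket dict and per-element 4-way classifying branch entirely: B extracts the raw sentiment list once, then runs three independent .count scans for positive/negative/mixed and derives neutral arithmetically as len(agents) minus those counts (folding unrecognized/missing sentiments in without ever branching on them).
import Mathlib
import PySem

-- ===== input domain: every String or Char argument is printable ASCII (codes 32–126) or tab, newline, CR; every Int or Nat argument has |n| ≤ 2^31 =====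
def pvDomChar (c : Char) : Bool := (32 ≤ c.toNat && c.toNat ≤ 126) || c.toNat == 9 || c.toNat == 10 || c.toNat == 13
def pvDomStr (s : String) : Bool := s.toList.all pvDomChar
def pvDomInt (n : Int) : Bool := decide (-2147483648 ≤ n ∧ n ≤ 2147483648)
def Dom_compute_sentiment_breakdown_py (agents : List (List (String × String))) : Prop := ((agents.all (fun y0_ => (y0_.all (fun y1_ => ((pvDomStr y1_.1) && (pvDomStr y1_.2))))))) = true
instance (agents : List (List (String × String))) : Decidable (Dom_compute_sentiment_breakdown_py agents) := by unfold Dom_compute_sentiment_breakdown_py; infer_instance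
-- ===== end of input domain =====

-- B drops A's mutable bucket dict and classifying branch: it extracts the sentiment list once, runs
-- three independent count scans, and derives neutral as len(agents) minus the other three; same O(n) cost.

-- ===== PORT A =====
def compute_sentiment_breakdown_py (agents : List (List (String × String))) : List (String × Int) :=
  let breakdown : PySem.Dict String Int :=
    PySem.Dict.ofList [("positive", 0), ("negative", 0), ("neutral", 0), ("mixed", 0)]
  let breakdown := agents.foldl (fun d a =>
    let s := (PySem.Dict.ofList a).getD "sentiment" "neutral"
    if d.contains s then d.modify s 0 (· + 1)
    else d.modify "neutral" 0 (· + 1)) breakdown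
  breakdown.items

-- ===== PORT B =====
def compute_sentiment_breakdown_py_alt (agents : List (List (String × String))) : List (String × Int) :=
  let sentiments := agents.map (fun a => (PySem.Dict.ofList a).getD "sentiment" "neutral")
  let p := PySem.List.count sentiments "positive"
  let n := PySem.List.count sentiments "negative"
  let m := PySem.List.count sentiments "mixed"
  [("positive", p), ("negative", n), ("neutral", (agents.length : Int) - p - n - m), ("mixed", m)]

-- ===== PRECONDITION & SPEC =====
def Spec_compute_sentiment_breakdown_py (agents : List (List (String × String))) (out : List (String × Int)) : Prop := out = compute_sentiment_breakdown_py_alt agents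
instance (agents : List (List (String × String))) (out : List (String × Int)) : Decidable (Spec_compute_sentiment_breakdown_py agents out) := by unfold Spec_compute_sentiment_breakdown_py; infer_instance

-- ===== CLAIM (what is proved, stated in full; the proofs are below) =====
def Claim_equal_compute_sentiment_breakdown_py : Prop := ∀ (agents : List (List (String × String))), Dom_compute_sentiment_breakdown_py agents → Spec_compute_sentiment_breakdown_py agents (compute_sentiment_breakdown_py agents)

-- ===== LEMMAS AND PROOFS =====

-- the sentiment string of one agent record
def pvSent (a : List (String × String)) : String := (PySem.Dict.ofList a).getD "sentiment" "neutral"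

-- A's loop, from an arbitrary 4-bucket state, in closed form
lemma foldA_closed (agents : List (List (String × String))) :
    ∀ (p n u m : Int),
    agents.foldl (fun d a =>
      if d.contains ((PySem.Dict.ofList a).getD "sentiment" "neutral")
      then d.modify ((PySem.Dict.ofList a).getD "sentiment" "neutral") 0 (· + 1)
      else d.modify "neutral" 0 (· + 1))
      (PySem.Dict.mk [("positive", p), ("negative", n), ("neutral", u), ("mixed", m)]) =
    PySem.Dict.mk [("positive", p + ((agents.map pvSent).count "positive" : Int)),
                   ("negative", n + ((agents.map pvSent).count "negative" : Int)),
                   ("neutral", u + ((agents.length : Int)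
                      - ((agents.map pvSent).count "positive" : Int)
                      - ((agents.map pvSent).count "negative" : Int)
                      - ((agents.map pvSent).count "mixed" : Int))),
                   ("mixed", m + ((agents.map pvSent).count "mixed" : Int))] := by
  induction agents with
  | nil => intro p n u m; simp
  | cons a rest ih =>
    intro p n u m
    simp only [List.foldl_cons, List.map_cons, List.length_cons, List.count_cons]
    by_cases hp : pvSent a = "positive"
    · rw [show ((PySem.Dict.ofList a).getD "sentiment" "neutral") = pvSent a from rfl, hp]
      rw [show (if (PySem.Dict.mk [("positive", p), ("negative", n), ("neutral", u), ("mixed", m)]).contains "positive"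
            then (PySem.Dict.mk [("positive", p), ("negative", n), ("neutral", u), ("mixed", m)]).modify "positive" 0 (· + 1)
            else (PySem.Dict.mk [("positive", p), ("negative", n), ("neutral", u), ("mixed", m)]).modify "neutral" 0 (· + 1))
          = PySem.Dict.mk [("positive", p + 1), ("negative", n), ("neutral", u), ("mixed", m)] from rfl]
      rw [ih]
      simp
      omega
    · by_cases hn : pvSent a = "negative"
      · rw [show ((PySem.Dict.ofList a).getD "sentiment" "neutral") = pvSent a from rfl, hn]
        rw [show (if (PySem.Dict.mk [("positive", p), ("negative", n), ("neutral", u), ("mixed", m)]).contains "negative"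
              then (PySem.Dict.mk [("positive", p), ("negative", n), ("neutral", u), ("mixed", m)]).modify "negative" 0 (· + 1)
              else (PySem.Dict.mk [("positive", p), ("negative", n), ("neutral", u), ("mixed", m)]).modify "neutral" 0 (· + 1))
            = PySem.Dict.mk [("positive", p), ("negative", n + 1), ("neutral", u), ("mixed", m)] from rfl]
        rw [ih]
        simp
        omega
      · by_cases hm : pvSent a = "mixed"
        · rw [show ((PySem.Dict.ofList a).getD "sentiment" "neutral") = pvSent a from rfl, hm]
          rw [show (if (PySem.Dict.mk [("positive", p), ("negative", n), ("neutral", u), ("mixed", m)]).contains "mixed"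
                then (PySem.Dict.mk [("positive", p), ("negative", n), ("neutral", u), ("mixed", m)]).modify "mixed" 0 (· + 1)
                else (PySem.Dict.mk [("positive", p), ("negative", n), ("neutral", u), ("mixed", m)]).modify "neutral" 0 (· + 1))
              = PySem.Dict.mk [("positive", p), ("negative", n), ("neutral", u), ("mixed", m + 1)] from rfl]
          rw [ih]
          simp
          omega
        · -- sentiment "neutral" or unrecognized: A bumps the "neutral" bucket either way
          have hstep : (if (PySem.Dict.mk [("positive", p), ("negative", n), ("neutral", u), ("mixed", m)]).contains ((PySem.Dict.ofList a).getD "sentiment" "neutral")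
                then (PySem.Dict.mk [("positive", p), ("negative", n), ("neutral", u), ("mixed", m)]).modify ((PySem.Dict.ofList a).getD "sentiment" "neutral") 0 (· + 1)
                else (PySem.Dict.mk [("positive", p), ("negative", n), ("neutral", u), ("mixed", m)]).modify "neutral" 0 (· + 1))
              = PySem.Dict.mk [("positive", p), ("negative", n), ("neutral", u + 1), ("mixed", m)] := by
            by_cases hu : pvSent a = "neutral"
            · rw [show ((PySem.Dict.ofList a).getD "sentiment" "neutral") = pvSent a from rfl, hu]
              rfl
            · rw [show ((PySem.Dict.ofList a).getD "sentiment" "neutral") = pvSent a from rfl]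
              have hc : (PySem.Dict.mk [("positive", p), ("negative", n), ("neutral", u), ("mixed", m)]).contains (pvSent a) = false := by
                simp only [PySem.Dict.contains_mk, List.any_cons, List.any_nil, Bool.or_false,
                  Bool.or_eq_false_iff, beq_eq_false_iff_ne, ne_eq]
                exact ⟨fun h => hp h.symm, fun h => hn h.symm, fun h => hu h.symm, fun h => hm h.symm⟩
              rw [hc]
              rfl
          rw [hstep, ih]
          simp [hp, hn, hm]
          omega

-- ===== VERDICT (by name: the statement is the Claim_ definition above) =====
theorem compute_sentiment_breakdown_py_spec : Claim_equal_compute_sentiment_breakdown_py := by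
  intro agents _
  unfold Spec_compute_sentiment_breakdown_py
  simp only [compute_sentiment_breakdown_py, compute_sentiment_breakdown_py_alt]
  rw [show (PySem.Dict.ofList [("positive", (0:Int)), ("negative", 0), ("neutral", 0), ("mixed", 0)])
        = PySem.Dict.mk [("positive", 0), ("negative", 0), ("neutral", 0), ("mixed", 0)] from rfl]
  rw [foldA_closed agents 0 0 0 0]
  simp [PySem.List.count_eq]
  exact ⟨rfl, rfl, rfl, rfl⟩
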